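-- pv_equiv track=rewrite | github.com/denzoned/pm4py-distr | pm4pydistr/discovery/imd/detection_utils.py | infer_start_activities_from_prev_connections_and_current_dfg
-- ===== SOURCE A (Python) =====
-- def infer_start_activities_from_prev_connections_and_current_dfg(initial_dfg, dfg, activities, include_self=True):
--     """
--     Infer the start activities from the previous connections
--
--     Parameters
--     -----------
--     initial_dfg
--         Initial DFG
--     dfg
--         Directly-follows graph
--     activities
--         List of the activities contained in DFG
--     """
--     start_activities = set()
--     for el in initial_dfg:
--         if el[0][1] in activities and not el[0][0] in activities:
--             start_activities.add(el[0][1])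
--     if include_self:
--         start_activities = start_activities.union(set(infer_start_activities(dfg)))
--     return start_activities
--
-- def infer_start_activities(dfg):
--     """
--     Infer start activities from a Directly-Follows Graph
--
--     Parameters
--     ----------
--     dfg
--         Directly-Follows Graph
--
--     Returns
--     ----------
--     start_activities
--         Start activities in the log
--     """
--     ingoing = get_ingoing_edges(dfg)
--     outgoing = get_outgoing_edges(dfg)
--
--     start_activities = []
--
--     for act in outgoing:
--         if act not in ingoing:
--             start_activities.append(act)
--
--     return start_activities
--
-- def get_outgoing_edges(dfg):
--     """
--     Gets outgoing edges of the provided DFG graph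
--     """
--     outgoing = {}
--     for el in dfg:
--         if type(el[0]) is str:
--             if not el[0] in outgoing:
--                 outgoing[el[0]] = {}
--             outgoing[el[0]][el[1]] = dfg[el]
--         else:
--             if not el[0][0] in outgoing:
--                 outgoing[el[0][0]] = {}
--             outgoing[el[0][0]][el[0][1]] = el[1]
--     return outgoing
--
-- def get_ingoing_edges(dfg):
--     """
--     Get ingoing edges of the provided DFG graph
--     """
--     ingoing = {}
--     for el in dfg:
--         if type(el[0]) is str:
--             if not el[1] in ingoing:
--                 ingoing[el[1]] = {}
--             ingoing[el[1]][el[0]] = dfg[el]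
--         else:
--             if not el[0][1] in ingoing:
--                 ingoing[el[0][1]] = {}
--             ingoing[el[0][1]][el[0][0]] = el[1]
--     return ingoing
-- ===== SOURCE B (Python) =====
-- def infer_start_activities_from_prev_connections_and_current_dfg(initial_dfg, dfg, activities, include_self=True):
--     """
--     Infer the start activities from the previous connections
--
--     Direct-scan version: no adjacency dicts and no source/target sets are
--     built.  A node is a self-inferred start activity iff it occurs as the
--     source of some DFG edge and no DFG edge points into it, which is checked
--     by rescanning the edge list for each edge's source.
--     """
--     start_activities = {el[0][1] for el in initial_dfg
--                         if el[0][1] in activities and el[0][0] not in activities}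
--     if include_self:
--         for el in dfg:
--             src = el[0] if type(el[0]) is str else el[0][0]
--             if all((e[1] if type(e[0]) is str else e[0][1]) != src for e in dfg):
--                 start_activities.add(src)
--     return start_activities
-- ===== Notes on version B (the rewrite author's own statement) =====
-- stated objective: alternative
-- what changed: B builds no adjacency dicts and no source/target index at all: it decides for each DFG edge's source whether it is a start activity by rescanning the edge list for an incoming edge (brute-force nested scan instead of A's dict-of-dicts indexing), trading A's O(n+m) indexing for an index-free O(m^2) scan.
import Mathlib
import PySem

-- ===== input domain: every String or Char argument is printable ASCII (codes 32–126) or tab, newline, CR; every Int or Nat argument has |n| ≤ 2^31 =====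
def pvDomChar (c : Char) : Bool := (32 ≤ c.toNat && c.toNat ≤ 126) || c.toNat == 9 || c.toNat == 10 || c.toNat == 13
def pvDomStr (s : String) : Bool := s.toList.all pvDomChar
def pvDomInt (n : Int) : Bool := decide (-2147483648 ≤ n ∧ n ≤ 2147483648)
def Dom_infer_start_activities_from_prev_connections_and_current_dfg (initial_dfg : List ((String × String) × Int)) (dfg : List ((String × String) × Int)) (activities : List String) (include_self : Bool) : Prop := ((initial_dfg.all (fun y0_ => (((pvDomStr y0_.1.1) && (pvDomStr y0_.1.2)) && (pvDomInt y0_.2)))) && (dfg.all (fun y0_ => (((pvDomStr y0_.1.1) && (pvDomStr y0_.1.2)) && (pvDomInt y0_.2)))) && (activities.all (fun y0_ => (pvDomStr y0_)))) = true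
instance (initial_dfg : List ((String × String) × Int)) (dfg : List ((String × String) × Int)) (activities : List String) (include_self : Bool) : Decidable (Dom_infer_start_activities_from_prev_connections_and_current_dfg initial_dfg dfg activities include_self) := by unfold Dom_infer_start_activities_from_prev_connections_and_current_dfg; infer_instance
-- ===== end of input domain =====

-- B replaces A's two dict-of-dicts adjacency structures by an index-free nested scan: for each
-- edge's source it rescans the edge list for an incoming edge (objective: alternative, not faster).
-- Return-value equivalence only; neither version mutates its arguments.

-- ===== PORT A =====
-- Under the typed domain every dfg element is ((src, trg), weight), so `type(el[0]) is str` is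
-- always False: only the tuple branch of get_outgoing_edges / get_ingoing_edges is reachable and ported.
def pvGetOutgoingEdges (dfg : List ((String × String) × Int)) : PySem.Dict String (PySem.Dict String Int) :=
  dfg.foldl
    (fun outgoing el =>
      (if outgoing.contains el.1.1 then outgoing else outgoing.insert el.1.1 PySem.Dict.empty).modify
        el.1.1 PySem.Dict.empty (fun m => m.insert el.1.2 el.2))
    PySem.Dict.empty

def pvGetIngoingEdges (dfg : List ((String × String) × Int)) : PySem.Dict String (PySem.Dict String Int) :=
  dfg.foldl
    (fun ingoing el =>
      (if ingoing.contains el.1.2 then ingoing else ingoing.insert el.1.2 PySem.Dict.empty).modify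
        el.1.2 PySem.Dict.empty (fun m => m.insert el.1.1 el.2))
    PySem.Dict.empty

def pvInferStartActivities (dfg : List ((String × String) × Int)) : List String :=
  let ingoing := pvGetIngoingEdges dfg
  let outgoing := pvGetOutgoingEdges dfg
  outgoing.keys.foldl (fun acc act => if ingoing.contains act then acc else acc ++ [act]) []

def infer_start_activities_from_prev_connections_and_current_dfg (initial_dfg : List ((String × String) × Int)) (dfg : List ((String × String) × Int)) (activities : List String) (include_self : Bool) : List String :=
  let start_activities : PySem.Set String :=
    initial_dfg.foldl
      (fun s el =>
        if activities.contains el.1.2 && !(activities.contains el.1.1) then PySem.Set.add s el.1.2 else s)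
      PySem.Set.empty
  if include_self then
    PySem.Set.union start_activities (PySem.Set.ofList (pvInferStartActivities dfg))
  else
    start_activities

-- ===== PORT B =====
-- Source B: a set comprehension for the prev-connection starts, then (when include_self) a loop over
-- dfg adding el's source whenever the inner rescan `all(target(e) != src for e in dfg)` finds no
-- incoming edge; the str branch is unreachable under the typed domain, so src/trg come from el.1.
def infer_start_activities_from_prev_connections_and_current_dfg_alt (initial_dfg : List ((String × String) × Int)) (dfg : List ((String × String) × Int)) (activities : List String) (include_self : Bool) : List String :=
  let start_activities : PySem.Set String :=
    PySem.Set.ofList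
      ((initial_dfg.filter
          (fun el => activities.contains el.1.2 && !(activities.contains el.1.1))).map (fun el => el.1.2))
  if include_self then
    dfg.foldl
      (fun s el =>
        if dfg.all (fun e => !(e.1.2 == el.1.1)) then PySem.Set.add s el.1.1 else s)
      start_activities
  else
    start_activities

-- ===== PRECONDITION & SPEC =====
def Spec_infer_start_activities_from_prev_connections_and_current_dfg (initial_dfg : List ((String × String) × Int)) (dfg : List ((String × String) × Int)) (activities : List String) (include_self : Bool) (out : List String) : Prop := out = infer_start_activities_from_prev_connections_and_current_dfg_alt initial_dfg dfg activities include_self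
instance (initial_dfg : List ((String × String) × Int)) (dfg : List ((String × String) × Int)) (activities : List String) (include_self : Bool) (out : List String) : Decidable (Spec_infer_start_activities_from_prev_connections_and_current_dfg initial_dfg dfg activities include_self out) := by unfold Spec_infer_start_activities_from_prev_connections_and_current_dfg; infer_instance

-- ===== CLAIM (what is proved, stated in full; the proofs are below) =====
def Claim_equal_infer_start_activities_from_prev_connections_and_current_dfg : Prop := ∀ (initial_dfg : List ((String × String) × Int)) (dfg : List ((String × String) × Int)) (activities : List String) (include_self : Bool), Dom_infer_start_activities_from_prev_connections_and_current_dfg initial_dfg dfg activities include_self → Spec_infer_start_activities_from_prev_connections_and_current_dfg initial_dfg dfg activities include_self (infer_start_activities_from_prev_connections_and_current_dfg initial_dfg dfg activities include_self)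

-- ===== LEMMAS AND PROOFS =====

-- List.contains on a Dict's keys agrees with Dict.contains.
lemma pv_keys_contains {κ ν : Type} [BEq κ] [LawfulBEq κ] (d : PySem.Dict κ ν) (k : κ) :
    (PySem.Dict.keys d).contains k = PySem.Dict.contains d k := by
  obtain ⟨items⟩ := d
  induction items with
  | nil => rfl
  | cons p rest ih =>
      simp [PySem.Dict.keys, PySem.Dict.contains] at ih ⊢
      rw [ih, Bool.beq_comm]

-- keys of Dict.insert are Set.add of the old keys.
lemma pv_keys_insert {κ ν : Type} [BEq κ] [LawfulBEq κ] (d : PySem.Dict κ ν) (k : κ) (v : ν) :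
    (PySem.Dict.insert d k v).keys = PySem.Set.add (PySem.Dict.keys d) k := by
  cases h : PySem.Dict.contains d k with
  | false =>
      simp [PySem.Dict.insert, h, PySem.Dict.keys, PySem.Set.add]
      intro x hx
      have hany : (d.items.any fun p => p.1 == k) = true :=
        List.any_eq_true.mpr ⟨(k, x), hx, by simp⟩
      unfold PySem.Dict.contains at h
      rw [h] at hany
      exact Bool.false_ne_true hany
  | true =>
      have hk : PySem.Set.contains (List.map (fun x => x.1) d.items) k = true :=
        (pv_keys_contains d k).trans h
      simp only [PySem.Dict.insert, h, if_true, PySem.Dict.keys, PySem.Set.add, hk]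
      rw [List.map_map]
      refine List.map_congr_left ?_
      intro p _
      by_cases hp : (p.1 == k) = true
      · simp [Function.comp, (eq_of_beq hp).symm]
      · simp [Function.comp, hp]

-- keys of A's per-edge update step are Set.add of the old keys.
lemma pv_keys_step {κ ν : Type} [BEq κ] [LawfulBEq κ] (d : PySem.Dict κ ν) (k : κ) (dflt : ν) (f : ν → ν) :
    ((if d.contains k then d else d.insert k dflt).modify k dflt f).keys
      = PySem.Set.add (PySem.Dict.keys d) k := by
  unfold PySem.Dict.modify
  cases h : PySem.Dict.contains d k with
  | true => simp [pv_keys_insert]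
  | false => simp [pv_keys_insert]

-- A filtered add-fold is the add-fold of the filtered, mapped list.
lemma pv_foldl_add_if {α β : Type} [BEq β] (p : α → Bool) (g : α → β) (l : List α) (s : PySem.Set β) :
    l.foldl (fun s el => if p el then PySem.Set.add s (g el) else s) s
      = ((l.filter p).map g).foldl PySem.Set.add s := by
  induction l generalizing s with
  | nil => rfl
  | cons x xs ih => by_cases h : p x <;> simp [h, ih]

-- keys of the outgoing-edges fold are the source-set fold.
lemma pv_keys_outgoing (dfg : List ((String × String) × Int)) (d : PySem.Dict String (PySem.Dict String Int)) :
    (dfg.foldl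
      (fun outgoing el =>
        (if outgoing.contains el.1.1 then outgoing else outgoing.insert el.1.1 PySem.Dict.empty).modify
          el.1.1 PySem.Dict.empty (fun m => m.insert el.1.2 el.2)) d).keys
      = dfg.foldl (fun s el => PySem.Set.add s el.1.1) d.keys := by
  induction dfg generalizing d with
  | nil => rfl
  | cons x xs ih => rw [List.foldl_cons, List.foldl_cons, ih, pv_keys_step]

lemma pv_keys_ingoing (dfg : List ((String × String) × Int)) (d : PySem.Dict String (PySem.Dict String Int)) :
    (dfg.foldl
      (fun ingoing el =>
        (if ingoing.contains el.1.2 then ingoing else ingoing.insert el.1.2 PySem.Dict.empty).modify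
          el.1.2 PySem.Dict.empty (fun m => m.insert el.1.1 el.2)) d).keys
      = dfg.foldl (fun s el => PySem.Set.add s el.1.2) d.keys := by
  induction dfg generalizing d with
  | nil => rfl
  | cons x xs ih => rw [List.foldl_cons, List.foldl_cons, ih, pv_keys_step]

-- an add-fold over the components is Set.ofList of the mapped list.
lemma pv_fold_add_eq_ofList_map {α β : Type} [BEq β] (f : α → β) (l : List α) :
    l.foldl (fun s el => PySem.Set.add s (f el)) PySem.Set.empty
      = PySem.Set.ofList (l.map f) := by
  rw [PySem.Set.ofList_eq_foldl, List.foldl_map]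
  rfl

-- A's infer_start_activities list IS the set difference sources - targets.
lemma pv_infer_eq_diff (dfg : List ((String × String) × Int)) :
    pvInferStartActivities dfg
      = PySem.Set.diff (PySem.Set.ofList (dfg.map (fun el => el.1.1)))
          (PySem.Set.ofList (dfg.map (fun el => el.1.2))) := by
  unfold pvInferStartActivities pvGetOutgoingEdges pvGetIngoingEdges
  have hflip : ∀ (ing : PySem.Dict String (PySem.Dict String Int)) (acc : List String) (act : String),
      (if ing.contains act then acc else acc ++ [act])
        = (if (!ing.contains act) = true then acc ++ [act] else acc) := by
    intro ing acc act
    cases h : PySem.Dict.contains ing act <;> simp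
  simp only [hflip]
  rw [PySem.List.foldl_append_if (fun act => !(dfg.foldl
      (fun ingoing el =>
        (if ingoing.contains el.1.2 then ingoing else ingoing.insert el.1.2 PySem.Dict.empty).modify
          el.1.2 PySem.Dict.empty (fun m => m.insert el.1.1 el.2)) PySem.Dict.empty).contains act)
      (fun act => act)]
  rw [List.map_id', pv_keys_outgoing]
  rw [show (PySem.Dict.empty : PySem.Dict String (PySem.Dict String Int)).keys = PySem.Set.empty from rfl,
      pv_fold_add_eq_ofList_map]
  unfold PySem.Set.diff
  refine congrArg₂ List.filter ?_ rfl
  funext a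
  rw [← pv_keys_contains, pv_keys_ingoing]
  rw [show (PySem.Dict.empty : PySem.Dict String (PySem.Dict String Int)).keys = PySem.Set.empty from rfl,
      pv_fold_add_eq_ofList_map]
  rfl

-- Set.ofList commutes with List.filter.
lemma pv_ofList_filter {α : Type} [BEq α] [LawfulBEq α] (p : α → Bool) (l : List α) :
    PySem.Set.ofList (l.filter p) = (PySem.Set.ofList l).filter p := by
  induction l with
  | nil => rfl
  | cons x xs ih =>
      by_cases h : p x = true
      · rw [List.filter_cons_of_pos h, PySem.Set.ofList_cons, PySem.Set.ofList_cons, ih,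
            List.filter_cons_of_pos h]
        unfold PySem.Set.discard
        rw [List.filter_filter, List.filter_filter]
        exact congrArg (x :: ·) (List.filter_congr fun a _ => Bool.and_comm _ _)
      · have hx : p x = false := by simpa using h
        have hpred : ∀ a, p a = (p a && !(a == x)) := by
          intro a
          cases hax : a == x with
          | true => rw [eq_of_beq hax, hx]; rfl
          | false => simp
        rw [List.filter_cons_of_neg h, PySem.Set.ofList_cons, List.filter_cons_of_neg h, ih]
        unfold PySem.Set.discard
        rw [List.filter_filter]
        exact List.filter_congr fun a _ => hpred a

-- updating with a list or with its dedup gives the same set.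
lemma pv_update_ofList {α : Type} [BEq α] [LawfulBEq α] (s : PySem.Set α) (l : List α) :
    PySem.Set.update s (PySem.Set.ofList l) = PySem.Set.update s l := by
  rw [PySem.Set.update_eq_append_filter, PySem.Set.update_eq_append_filter,
      PySem.Set.ofList_ofList]

-- the inner rescan of B is the complement of membership among the targets.
lemma pv_all_ne_eq_not_contains (dfg : List ((String × String) × Int)) (a : String) :
    (dfg.all (fun e => !(e.1.2 == a)))
      = !((dfg.map (fun el => el.1.2)).contains a) := by
  induction dfg with
  | nil => rfl
  | cons x xs ih => simp_all [List.all_cons, Bool.beq_comm]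

-- Set.contains on ofList agrees with List.contains.
lemma pv_contains_ofList {α : Type} [BEq α] [LawfulBEq α] (l : List α) (a : α) :
    PySem.Set.contains (PySem.Set.ofList l) a = l.contains a := by
  by_cases h : a ∈ l <;> simp [h, PySem.Set.mem_ofList]

-- filtering by a predicate of the mapped value commutes with the map.
lemma pv_filter_map {α β : Type} (q : β → Bool) (f : α → β) (l : List α) :
    (l.filter (fun el => q (f el))).map f = (l.map f).filter q := by
  induction l with
  | nil => rfl
  | cons x xs ih =>
      by_cases h : q (f x) = true <;>
        simp [h, ih]

-- ===== VERDICT (by name: the statement is the Claim_ definition above) =====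
theorem infer_start_activities_from_prev_connections_and_current_dfg_spec : Claim_equal_infer_start_activities_from_prev_connections_and_current_dfg := by
  intro initial_dfg dfg activities include_self _
  unfold Spec_infer_start_activities_from_prev_connections_and_current_dfg
  unfold infer_start_activities_from_prev_connections_and_current_dfg
  unfold infer_start_activities_from_prev_connections_and_current_dfg_alt
  have hprev : initial_dfg.foldl
      (fun s el => if activities.contains el.1.2 && !(activities.contains el.1.1) then PySem.Set.add s el.1.2 else s)
      PySem.Set.empty
      = PySem.Set.ofList ((initial_dfg.filter
          (fun el => activities.contains el.1.2 && !(activities.contains el.1.1))).map (fun el => el.1.2)) := by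
    rw [pv_foldl_add_if]; rfl
  cases include_self with
  | false => simpa using hprev
  | true =>
      simp only [if_true, hprev]
      set starts := PySem.Set.ofList ((initial_dfg.filter
          (fun el => activities.contains el.1.2 && !(activities.contains el.1.1))).map (fun el => el.1.2))
      -- B's loop, as an update with a filtered source list
      rw [pv_foldl_add_if (fun el => dfg.all (fun e => !(e.1.2 == el.1.1))) (fun el => el.1.1) dfg starts]
      -- A's union, as an update with the deduplicated filtered source list
      have hinf : PySem.Set.ofList (pvInferStartActivities dfg)
          = PySem.Set.diff (PySem.Set.ofList (dfg.map (fun el => el.1.1)))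
              (PySem.Set.ofList (dfg.map (fun el => el.1.2))) := by
        rw [pv_infer_eq_diff]
        exact PySem.Set.ofList_eq_self_of_nodup _
          (List.Nodup.filter _ (PySem.Set.nodup_ofList _))
      rw [PySem.Set.union, hinf]
      unfold PySem.Set.diff
      -- both are updates of `starts` with the same filtered source list, up to dedup
      have hq : ∀ el : (String × String) × Int,
          (dfg.all (fun e => !(e.1.2 == el.1.1)))
            = !(PySem.Set.contains (PySem.Set.ofList (dfg.map (fun el => el.1.2))) el.1.1) := by
        intro el
        rw [pv_all_ne_eq_not_contains, pv_contains_ofList]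
      have hpred : (fun el : (String × String) × Int => dfg.all (fun e => !(e.1.2 == el.1.1)))
          = (fun el : (String × String) × Int =>
              (fun a => !(PySem.Set.contains (PySem.Set.ofList (dfg.map (fun el => el.1.2))) a)) el.1.1) :=
        funext fun el => hq el
      have hmapfilter :
          ((dfg.filter (fun el => dfg.all (fun e => !(e.1.2 == el.1.1)))).map (fun el => el.1.1))
            = (dfg.map (fun el => el.1.1)).filter
                (fun a => !(PySem.Set.contains (PySem.Set.ofList (dfg.map (fun el => el.1.2))) a)) := by
        rw [hpred]
        exact pv_filter_map
          (fun a => !(PySem.Set.contains (PySem.Set.ofList (dfg.map (fun el => el.1.2))) a))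
          (fun el => el.1.1) dfg
      rw [show (List.foldl PySem.Set.add starts
            ((dfg.filter (fun el => dfg.all (fun e => !(e.1.2 == el.1.1)))).map (fun el => el.1.1)))
          = PySem.Set.update starts
            ((dfg.filter (fun el => dfg.all (fun e => !(e.1.2 == el.1.1)))).map (fun el => el.1.1)) from rfl]
      rw [hmapfilter, ← pv_ofList_filter, pv_update_ofList]
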